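-- pv_equiv track=rewrite | github.com/nicolargo/glances | glances/plugins/plugin/dag.py | _dfs_order
-- ===== SOURCE A (Python) =====
-- def _dfs_order(plugin, graph, seen):
--     """Helper to preserve depth-first order."""
--     if plugin in seen:
--         return []
--     seen.add(plugin)
--     order = []
--     for dep in graph.get(plugin, []):
--         order.extend(_dfs_order(dep, graph, seen))
--     order.append(plugin)
--     return order
-- ===== SOURCE B (Python) =====
-- def _dfs_order(plugin, graph, seen):
--     """Helper to preserve depth-first order (iterative, explicit stack of frames)."""
--     if plugin in seen:
--         return []
--     seen.add(plugin)
--     order = []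
--     stack = [(plugin, iter(graph.get(plugin, ())))]
--     while stack:
--         node, deps = stack[-1]
--         for dep in deps:
--             if dep not in seen:
--                 seen.add(dep)
--                 stack.append((dep, iter(graph.get(dep, ()))))
--                 break
--         else:
--             stack.pop()
--             order.append(node)
--     return order
-- ===== Notes on version B (the rewrite author's own statement) =====
-- stated objective: alternative
-- what changed: Replaces A's recursion with an iterative DFS driven by an explicit stack of (node, pending-deps) frames that appends each node to the output when its frame is popped, producing the same post-order without recursion.
import Mathlib
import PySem

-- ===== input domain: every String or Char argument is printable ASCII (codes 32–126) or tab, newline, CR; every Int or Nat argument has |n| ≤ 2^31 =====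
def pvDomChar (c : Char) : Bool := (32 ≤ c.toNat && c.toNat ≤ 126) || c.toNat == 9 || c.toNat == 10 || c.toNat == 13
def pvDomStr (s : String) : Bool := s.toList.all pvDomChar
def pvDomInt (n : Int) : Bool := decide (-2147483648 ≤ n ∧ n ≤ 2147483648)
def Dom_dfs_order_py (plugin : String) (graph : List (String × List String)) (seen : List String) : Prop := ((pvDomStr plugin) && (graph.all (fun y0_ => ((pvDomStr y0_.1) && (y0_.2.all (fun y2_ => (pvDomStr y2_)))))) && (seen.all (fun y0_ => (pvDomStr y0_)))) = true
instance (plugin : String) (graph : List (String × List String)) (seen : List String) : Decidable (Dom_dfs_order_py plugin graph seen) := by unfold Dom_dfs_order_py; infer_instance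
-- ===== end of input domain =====

-- B replaces A's recursion by an iterative DFS with an explicit stack of (node, pending-deps)
-- frames (same post-order, same result).  Both Pythons mutate `seen` identically; the theorem
-- below is about the RETURN value only.  The `fuel` argument of the ports is a totality guard
-- (it never runs out: each fuel-consuming call adds a fresh node of the graph to `seen`).

-- graph.get(p, []) on the association list (first match)
def pvDeps (graph : List (String × List String)) (p : String) : List String :=
  PySem.Dict.getD (PySem.Dict.mk graph) p []

-- all strings occurring as a dependency anywhere in the graph (fuel bound)
def pvAllDeps (graph : List (String × List String)) : List String :=
  (graph.map Prod.snd).flatten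

-- ===== PORT A =====
mutual
-- the recursive _dfs_order, state (order, seen) threaded as in Python
def pvDfsA (g : List (String × List String)) : Nat → String → List String → List String × List String
  | 0, _, seen => ([], seen)          -- dead branch (fuel guard)
  | Nat.succ f, p, seen =>
    if PySem.Set.contains seen p then ([], seen)
    else
      let r := pvGoA g f (pvDeps g p) (PySem.Set.add seen p)
      (r.1 ++ [p], r.2)
  termination_by f _ _ => (f, 0)

-- the `for dep in graph.get(plugin, []): order.extend(...)` loop
def pvGoA (g : List (String × List String)) : Nat → List String → List String → List String × List String
  | _, [], seen => ([], seen)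
  | f, d :: ds, seen =>
    let r1 := pvDfsA g f d seen
    let r2 := pvGoA g f ds r1.2
    (r1.1 ++ r2.1, r2.2)
  termination_by f ds _ => (f, ds.length + 1)
end

def dfs_order_py (plugin : String) (graph : List (String × List String)) (seen : List String) : List String :=
  (pvDfsA graph ((pvAllDeps graph).length + 2) plugin seen).1

-- ===== PORT B =====
-- the while-stack loop of Source B: top frame (node, pending deps); skip seen deps, push the first
-- unseen one (marking it seen), pop an exhausted frame appending its node to `order` (= acc)
def pvLoopB (g : List (String × List String)) : Nat → List (String × List String) → List String → List String → List String
  | _, [], acc, _ => acc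
  | f, (n, []) :: rest, acc, seen => pvLoopB g f rest (acc ++ [n]) seen
  | f, (n, d :: ds) :: rest, acc, seen =>
    if PySem.Set.contains seen d then pvLoopB g f ((n, ds) :: rest) acc seen
    else
      match f with
      | 0 => acc                      -- dead branch (fuel guard)
      | Nat.succ f' => pvLoopB g f' ((d, pvDeps g d) :: (n, ds) :: rest) acc (PySem.Set.add seen d)
  termination_by f stack _ _ => (f, (stack.map (fun fr => fr.2.length + 1)).sum)

def dfs_order_py_alt (plugin : String) (graph : List (String × List String)) (seen : List String) : List String :=
  if PySem.Set.contains seen plugin then []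
  else pvLoopB graph ((pvAllDeps graph).length + 2) [(plugin, pvDeps graph plugin)] [] (PySem.Set.add seen plugin)

-- ===== PRECONDITION & SPEC =====
def Spec_dfs_order_py (plugin : String) (graph : List (String × List String)) (seen : List String) (out : List String) : Prop := out = dfs_order_py_alt plugin graph seen
instance (plugin : String) (graph : List (String × List String)) (seen : List String) (out : List String) : Decidable (Spec_dfs_order_py plugin graph seen out) := by unfold Spec_dfs_order_py; infer_instance

-- ===== CLAIM (what is proved, stated in full; the proofs are below) =====
def Claim_equal_dfs_order_py : Prop := ∀ (plugin : String) (graph : List (String × List String)) (seen : List String), Dom_dfs_order_py plugin graph seen → Spec_dfs_order_py plugin graph seen (dfs_order_py plugin graph seen)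

-- ===== LEMMAS AND PROOFS =====

-- number of elements of V not yet seen: the quantity the fuel bounds
def pvM (V seen : List String) : Nat :=
  (V.dedup.filter (fun x => !(seen.contains x))).length

-- step / unfolding lemmas for the ports
theorem loopB_nil (g : List (String × List String)) (f : Nat) (acc seen : List String) :
    pvLoopB g f [] acc seen = acc := by simp [pvLoopB]

theorem loopB_pop (g : List (String × List String)) (f : Nat) (n : String)
    (rest : List (String × List String)) (acc seen : List String) :
    pvLoopB g f ((n, []) :: rest) acc seen = pvLoopB g f rest (acc ++ [n]) seen := by
  simp [pvLoopB]

theorem loopB_skip (g : List (String × List String)) (f : Nat) (n d : String) (ds : List String)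
    (rest : List (String × List String)) (acc seen : List String) (hd : d ∈ seen) :
    pvLoopB g f ((n, d :: ds) :: rest) acc seen = pvLoopB g f ((n, ds) :: rest) acc seen := by
  rw [pvLoopB.eq_def]; simp [hd]

theorem loopB_push (g : List (String × List String)) (f : Nat) (n d : String) (ds : List String)
    (rest : List (String × List String)) (acc seen : List String) (hd : d ∉ seen) :
    pvLoopB g (f + 1) ((n, d :: ds) :: rest) acc seen
      = pvLoopB g f ((d, pvDeps g d) :: (n, ds) :: rest) acc (PySem.Set.add seen d) := by
  rw [pvLoopB.eq_def]; simp [hd]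

theorem goA_nil (g : List (String × List String)) (f : Nat) (s : List String) :
    pvGoA g f [] s = ([], s) := by
  rw [pvGoA.eq_def]

theorem goA_cons (g : List (String × List String)) (f : Nat) (d : String) (ds : List String)
    (s : List String) :
    pvGoA g f (d :: ds) s
      = ((pvDfsA g f d s).1 ++ (pvGoA g f ds (pvDfsA g f d s).2).1,
         (pvGoA g f ds (pvDfsA g f d s).2).2) := by
  rw [pvGoA.eq_def]

theorem pvDfsA_seen (g : List (String × List String)) (f : Nat) (p : String)
    (s : List String) (h : p ∈ s) : pvDfsA g f p s = ([], s) := by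
  cases f with
  | zero => simp [pvDfsA]
  | succ f => rw [pvDfsA.eq_def]; simp [h]

theorem dfsA_unseen (g : List (String × List String)) (f : Nat) (p : String)
    (s : List String) (h : p ∉ s) :
    pvDfsA g (f + 1) p s
      = ((pvGoA g f (pvDeps g p) (PySem.Set.add s p)).1 ++ [p],
         (pvGoA g f (pvDeps g p) (PySem.Set.add s p)).2) := by
  rw [pvDfsA.eq_def]; simp [h]

-- small counting lemmas
theorem pvM_le (V seen : List String) : pvM V seen ≤ V.length :=
  List.Sublist.length_le (List.Sublist.trans List.filter_sublist (List.dedup_sublist V))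

theorem pvFilter_le {α : Type} (l : List α) (p q : α → Bool)
    (h : ∀ x, q x = true → p x = true) : (l.filter q).length ≤ (l.filter p).length := by
  induction l with
  | nil => simp
  | cons a t ih =>
    simp only [List.filter_cons]
    by_cases hq : q a = true
    · rw [if_pos hq, if_pos (h a hq)]
      simpa using ih
    · rw [if_neg hq]
      by_cases hp : p a = true
      · rw [if_pos hp]; exact Nat.le_succ_of_le ih
      · rw [if_neg hp]; exact ih

theorem pvFilter_lt {α : Type} (l : List α) (p q : α → Bool)
    (h : ∀ x, q x = true → p x = true) (d : α) (hd : d ∈ l)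
    (hp : p d = true) (hq : q d = false) : (l.filter q).length < (l.filter p).length := by
  induction l with
  | nil => simp at hd
  | cons a t ih =>
    simp only [List.filter_cons]
    rcases List.mem_cons.1 hd with rfl | hdt
    · rw [if_pos hp, if_neg (by simp [hq])]
      exact Nat.lt_succ_of_le (pvFilter_le t p q h)
    · by_cases hqa : q a = true
      · rw [if_pos hqa, if_pos (h a hqa)]
        exact Nat.succ_lt_succ (ih hdt)
      · rw [if_neg hqa]
        by_cases hpa : p a = true
        · rw [if_pos hpa]; exact Nat.lt_succ_of_lt (ih hdt)
        · rw [if_neg hpa]; exact ih hdt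

theorem pvM_anti (V s t : List String) (h : ∀ x ∈ s, x ∈ t) : pvM V t ≤ pvM V s := by
  apply pvFilter_le
  intro x hx
  simp only [List.contains_eq_mem, Bool.not_eq_true', decide_eq_false_iff_not] at hx ⊢
  exact fun hxs => hx (h x hxs)

theorem pvMem_add (s : List String) (p x : String) :
    x ∈ PySem.Set.add s p ↔ x ∈ s ∨ x = p := PySem.Set.mem_add s p x

theorem pvM_add_lt (V s : List String) (d : String) (hdV : d ∈ V) (hds : d ∉ s) :
    pvM V (PySem.Set.add s d) < pvM V s := by
  refine pvFilter_lt V.dedup _ _ ?_ d (List.mem_dedup.2 hdV) ?_ ?_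
  · intro x hx
    simp only [List.contains_eq_mem, Bool.not_eq_true', decide_eq_false_iff_not] at hx ⊢
    exact fun hxs => hx ((pvMem_add s d x).2 (Or.inl hxs))
  · simp [List.contains_eq_mem, hds]
  · simp [List.contains_eq_mem, (pvMem_add s d d).2 (Or.inr rfl)]

theorem pvM_pos (V s : List String) (d : String) (hdV : d ∈ V) (hds : d ∉ s) :
    1 ≤ pvM V s := by
  unfold pvM
  have hmem : d ∈ V.dedup.filter (fun x => !(s.contains x)) := by
    refine List.mem_filter.2 ⟨List.mem_dedup.2 hdV, ?_⟩
    simp [List.contains_eq_mem, hds]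
  exact List.length_pos_of_mem hmem

-- seen only grows
theorem pvGoA_mono_of (g : List (String × List String)) (f : Nat)
    (h : ∀ p s, ∀ x ∈ s, x ∈ (pvDfsA g f p s).2) :
    ∀ ds s, ∀ x ∈ s, x ∈ (pvGoA g f ds s).2 := by
  intro ds
  induction ds with
  | nil => intro s x hx; simpa [goA_nil] using hx
  | cons d ds ih =>
    intro s x hx
    rw [goA_cons]
    exact ih _ x (h d s x hx)

theorem pvDfsA_mono (g : List (String × List String)) :
    ∀ f p s, ∀ x ∈ s, x ∈ (pvDfsA g f p s).2 := by
  intro f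
  induction f with
  | zero => intro p s x hx; simpa [pvDfsA] using hx
  | succ f ih =>
    intro p s x hx
    by_cases h : p ∈ s
    · simp [pvDfsA_seen g _ p s h, hx]
    · rw [dfsA_unseen g f p s h]
      exact pvGoA_mono_of g f ih _ _ x ((pvMem_add s p x).2 (Or.inl hx))

theorem pvGoA_mono (g : List (String × List String)) (f : Nat) :
    ∀ ds s, ∀ x ∈ s, x ∈ (pvGoA g f ds s).2 :=
  pvGoA_mono_of g f (pvDfsA_mono g f)

-- every dependency string is in pvAllDeps
theorem pvDeps_subset (g : List (String × List String)) (x d : String)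
    (h : d ∈ pvDeps g x) : d ∈ pvAllDeps g := by
  induction g with
  | nil => simp [pvDeps, PySem.Dict.getD, PySem.Dict.get?] at h
  | cons kv t ih =>
    obtain ⟨k, v⟩ := kv
    simp only [pvDeps, PySem.Dict.getD_eq_get?_getD, PySem.Dict.get?_mk_cons] at h ih
    simp only [pvAllDeps, List.map_cons, List.flatten_cons, List.mem_append]
    by_cases hk : (k == x) = true
    · rw [hk] at h; exact Or.inl h
    · simp only [Bool.not_eq_true] at hk; rw [hk] at h
      exact Or.inr (ih h)

-- THE SIMULATION: processing one frame of B's stack computes A's fold over the deps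
theorem pvSim (g : List (String × List String)) (V : List String)
    (hV : ∀ x d, d ∈ pvDeps g x → d ∈ V) :
    ∀ fA : Nat, ∀ ds : List String, (∀ d ∈ ds, d ∈ V) → ∀ s : List String,
      pvM V s ≤ fA →
      ∀ (n : String) (rest : List (String × List String)) (acc : List String) (fB : Nat),
        pvM V s ≤ fB →
        ∃ fB', pvM V (pvGoA g fA ds s).2 ≤ fB' ∧
          pvLoopB g fB ((n, ds) :: rest) acc s
            = pvLoopB g fB' rest (acc ++ (pvGoA g fA ds s).1 ++ [n]) (pvGoA g fA ds s).2 := by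
  intro fA
  induction fA using Nat.strong_induction_on with
  | _ fA IH =>
    intro ds
    induction ds with
    | nil =>
      intro _ s hsA n rest acc fB hsB
      refine ⟨fB, ?_, ?_⟩
      · rw [goA_nil]; exact hsB
      · rw [goA_nil, loopB_pop]; simp
    | cons d ds ihds =>
      intro hdsV s hsA n rest acc fB hsB
      have hdV : d ∈ V := hdsV d (List.mem_cons_self)
      have hdsV' : ∀ x ∈ ds, x ∈ V := fun x hx => hdsV x (List.mem_cons_of_mem _ hx)
      by_cases hd : d ∈ s
      · -- d already seen: A's recursive call returns ([], s); B skips it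
        obtain ⟨fB', h1, h2⟩ := ihds hdsV' s hsA n rest acc fB hsB
        refine ⟨fB', ?_, ?_⟩
        · rw [goA_cons, pvDfsA_seen g fA d s hd]; exact h1
        · rw [loopB_skip g fB n d ds rest acc s hd, h2, goA_cons, pvDfsA_seen g fA d s hd]
          simp
      · -- d unseen: B pushes a frame for d; the outer IH processes it = A's recursive call
        have hpos : 1 ≤ pvM V s := pvM_pos V s d hdV hd
        obtain ⟨fA', rfl⟩ : ∃ k, fA = k + 1 := ⟨fA - 1, by omega⟩
        obtain ⟨fB', rfl⟩ : ∃ k, fB = k + 1 := ⟨fB - 1, by omega⟩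
        have hlt : pvM V (PySem.Set.add s d) < pvM V s := pvM_add_lt V s d hdV hd
        obtain ⟨fB2, hb2, heq1⟩ :=
          IH fA' (by omega) (pvDeps g d) (fun x hx => hV d x hx)
            (PySem.Set.add s d) (by omega) d ((n, ds) :: rest) acc fB' (by omega)
        have hmono : ∀ x ∈ PySem.Set.add s d,
            x ∈ (pvGoA g fA' (pvDeps g d) (PySem.Set.add s d)).2 :=
          pvGoA_mono g fA' _ _
        have hs2A : pvM V (pvGoA g fA' (pvDeps g d) (PySem.Set.add s d)).2 ≤ fA' + 1 := by
          have := pvM_anti V (PySem.Set.add s d) _ hmono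
          omega
        obtain ⟨fB3, hb3, heq2⟩ :=
          ihds hdsV' _ hs2A n rest
            (acc ++ (pvGoA g fA' (pvDeps g d) (PySem.Set.add s d)).1 ++ [d]) fB2 hb2
        refine ⟨fB3, ?_, ?_⟩
        · rw [goA_cons, dfsA_unseen g fA' d s hd]
          exact hb3
        · rw [loopB_push g fB' n d ds rest acc s hd, heq1, heq2, goA_cons,
            dfsA_unseen g fA' d s hd]
          simp

theorem pvM_add_le_len (g : List (String × List String)) (p : String) (s : List String) :
    pvM (p :: pvAllDeps g) (PySem.Set.add s p) ≤ (pvAllDeps g).length + 1 := by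
  have := pvM_le (p :: pvAllDeps g) (PySem.Set.add s p)
  simpa using this

-- ===== VERDICT (by name: the statement is the Claim_ definition above) =====
theorem dfs_order_py_spec : Claim_equal_dfs_order_py := by
  intro plugin graph seen _
  unfold Spec_dfs_order_py dfs_order_py dfs_order_py_alt
  by_cases h : plugin ∈ seen
  · simp [pvDfsA_seen graph _ plugin seen h, h]
  · set V := plugin :: pvAllDeps graph with hV
    have hVdeps : ∀ x d, d ∈ pvDeps graph x → d ∈ V :=
      fun x d hd => List.mem_cons_of_mem _ (pvDeps_subset graph x d hd)
    have hbound : pvM V (PySem.Set.add seen plugin) ≤ (pvAllDeps graph).length + 1 :=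
      pvM_add_le_len graph plugin seen
    obtain ⟨fB', _, heq⟩ :=
      pvSim graph V hVdeps ((pvAllDeps graph).length + 1) (pvDeps graph plugin)
        (fun d hd => hVdeps plugin d hd) (PySem.Set.add seen plugin) hbound
        plugin [] [] ((pvAllDeps graph).length + 2) (by omega)
    rw [if_neg (by simp [h])]
    have h2 : (pvAllDeps graph).length + 2 = ((pvAllDeps graph).length + 1) + 1 := rfl
    rw [h2, heq, dfsA_unseen graph ((pvAllDeps graph).length + 1) plugin seen h, loopB_nil]
    simp
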